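-- pv_equiv track=rewrite | github.com/UnloosedFiend/ai-traffic-management | src/logic/traffic_logic.py | decide_lane
-- ===== SOURCE A (Python) =====
-- from typing import Dict, Optional, Tuple
--
-- def decide_lane(lane_data: dict) -> Tuple[int, int, bool]:
--     """
--     Legacy interface for simple lane decision.
--
--     Args:
--         lane_data: {lane_id: {"count": int, "emergency": bool}, ...}
--
--     Returns:
--         (lane_id, green_duration, emergency)
--     """
--     MIN_GREEN = 5
--     MAX_GREEN = 30
--     BASE_GREEN = 10
--
--     # Emergency preemption
--     for lane_id, data in lane_data.items():
--         if data.get("emergency", False):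
--             return lane_id, MAX_GREEN, True
--
--     # Density-based selection
--     selected_lane = max(lane_data, key=lambda k: lane_data[k].get("count", 0))
--
--     # Compute green time
--     green_time = BASE_GREEN + lane_data[selected_lane].get("count", 0)
--     green_time = max(MIN_GREEN, min(green_time, MAX_GREEN))
--
--     return selected_lane, green_time, False
-- ===== SOURCE B (Python) =====
-- def decide_lane(lane_data: dict):
--     # Emergency preemption via next() over a generator; density selection by a
--     # stable reverse sort on count (Python's stable sort keeps the first
--     # maximal-count lane at the head, matching max's first-max tie rule).
--     MIN_GREEN = 5
--     MAX_GREEN = 30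
--     BASE_GREEN = 10
--
--     items = list(lane_data.items())
--     hit = next((lane_id for lane_id, data in items if data.get("emergency", False)), None)
--     if hit is not None:
--         return hit, MAX_GREEN, True
--
--     lane_id, data = sorted(items, key=lambda kv: kv[1].get("count", 0), reverse=True)[0]
--     return lane_id, max(MIN_GREEN, min(BASE_GREEN + data.get("count", 0), MAX_GREEN)), False
-- ===== Notes on version B (the rewrite author's own statement) =====
-- stated objective: alternative
-- what changed: A loops for an emergency lane and then picks the busiest lane with max() over the keys plus per-key dict lookups; B finds an emergency via next() on a generator and otherwise ranks the items by a stable reverse sort on count and takes the head, whose stability reproduces max's first-max tie rule.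
import Mathlib
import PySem

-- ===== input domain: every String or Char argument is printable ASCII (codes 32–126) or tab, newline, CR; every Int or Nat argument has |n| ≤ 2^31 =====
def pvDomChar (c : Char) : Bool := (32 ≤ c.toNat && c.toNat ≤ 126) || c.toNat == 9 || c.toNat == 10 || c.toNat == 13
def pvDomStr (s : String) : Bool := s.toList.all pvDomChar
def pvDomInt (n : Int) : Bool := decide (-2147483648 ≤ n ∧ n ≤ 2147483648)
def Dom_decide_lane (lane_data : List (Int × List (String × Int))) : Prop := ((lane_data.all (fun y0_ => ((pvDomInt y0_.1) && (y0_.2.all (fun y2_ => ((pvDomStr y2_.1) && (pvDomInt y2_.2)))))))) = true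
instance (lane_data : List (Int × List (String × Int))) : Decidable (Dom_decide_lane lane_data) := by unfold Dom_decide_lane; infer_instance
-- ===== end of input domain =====

-- B replaces A's key-based max() selection by a stable reverse sort on count (head = first maximal
-- lane) and its emergency loop by a first-match search (objective: alternative algorithm).


-- shared dict primitive: d.get(k, 0) — first match in the association list (also used for
-- d.get("emergency", False): the default 0 is falsy exactly like Python's False)
def pvGetI (d : List (String × Int)) (k : String) : Int :=
  match d.find? (fun p => p.1 == k) with
  | some p => p.2
  | none => 0

-- ===== PORT A =====
-- A's emergency-preemption for-loop: first lane whose data.get("emergency", False) is truthy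
def pvFindEmerg : List (Int × List (String × Int)) → Option Int
  | [] => none
  | (lid, d) :: rest => if pvGetI d "emergency" ≠ 0 then some lid else pvFindEmerg rest

-- lane_data[k] (the key always comes from lane_data's own keys here, so the lookup succeeds)
def pvLaneGet (lane_data : List (Int × List (String × Int))) (k : Int) : List (String × Int) :=
  match lane_data.find? (fun p => p.1 == k) with
  | some p => p.2
  | none => []

def decide_lane (lane_data : List (Int × List (String × Int))) : Int × Int × Bool :=
  match pvFindEmerg lane_data with
  | some lid => (lid, 30, true)
  | none =>
    match PySem.List.max? (lane_data.map Prod.fst)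
        (fun k => pvGetI (pvLaneGet lane_data k) "count") with
    | none => (0, 0, false)  -- Python's max raises ValueError here; excluded by Pre_
    | some sel =>
      let green := 10 + pvGetI (pvLaneGet lane_data sel) "count"
      (sel, max 5 (min green 30), false)

-- ===== PORT B =====
def decide_lane_alt (lane_data : List (Int × List (String × Int))) : Int × Int × Bool :=
  -- next((lane_id for lane_id, data in items if data.get("emergency", False)), None)
  match lane_data.find? (fun p => decide (pvGetI p.2 "emergency" ≠ 0)) with
  | some (lid, _) => (lid, 30, true)
  | none =>
    -- sorted(items, key=lambda kv: kv[1].get("count", 0), reverse=True)[0]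
    match PySem.List.sorted lane_data (fun kv => pvGetI kv.2 "count") true with
    | [] => (0, 0, false)  -- ranked[0] raises IndexError here; excluded by Pre_
    | (lid, d) :: _ => (lid, max 5 (min (10 + pvGetI d "count") 30), false)

-- ===== PRECONDITION & SPEC =====
-- Pre_ excludes the empty dict, on which both A (via max) and B (via [0]) raise, and association
-- lists with duplicate lane ids, which do not correspond to any Python dict input.
def Pre_decide_lane (lane_data : List (Int × List (String × Int))) : Prop :=
  lane_data ≠ [] ∧ (lane_data.map Prod.fst).Nodup
instance (lane_data : List (Int × List (String × Int))) : Decidable (Pre_decide_lane lane_data) := by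
  unfold Pre_decide_lane; infer_instance

def pvWitness_decide_lane : (List (Int × List (String × Int))) :=
  [(1, [("count", 3)]), (2, [("count", 7), ("emergency", 0)])]

def Spec_decide_lane (lane_data : List (Int × List (String × Int))) (out : Int × Int × Bool) : Prop := out = decide_lane_alt lane_data
instance (lane_data : List (Int × List (String × Int))) (out : Int × Int × Bool) : Decidable (Spec_decide_lane lane_data out) := by unfold Spec_decide_lane; infer_instance

-- ===== CLAIM (what is proved, stated in full; the proofs are below) =====
def Claim_equal_decide_lane : Prop := ∀ (lane_data : List (Int × List (String × Int))), Dom_decide_lane lane_data → Pre_decide_lane lane_data → Spec_decide_lane lane_data (decide_lane lane_data)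

-- ===== LEMMAS AND PROOFS =====

-- A's emergency loop is B's first-match search, projected to the lane id
theorem pvFindEmerg_eq_find? : ∀ (xs : List (Int × List (String × Int))),
    pvFindEmerg xs = (xs.find? (fun p => decide (pvGetI p.2 "emergency" ≠ 0))).map Prod.fst := by
  intro xs
  induction xs with
  | nil => rfl
  | cons x rest ih =>
    obtain ⟨l, d⟩ := x
    by_cases he : pvGetI d "emergency" ≠ 0 <;>
      simp [pvFindEmerg, he, ih]

-- under distinct lane ids, looking up a member's own key returns its own data
theorem pvLaneGet_self : ∀ (xs : List (Int × List (String × Int))),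
    (xs.map Prod.fst).Nodup → ∀ x ∈ xs, pvLaneGet xs x.1 = x.2 := by
  intro xs
  induction xs with
  | nil => simp
  | cons y rest ih =>
    intro hnd x hx
    obtain ⟨l, d⟩ := y
    simp only [List.map_cons, List.nodup_cons] at hnd
    rw [List.mem_cons] at hx
    rcases hx with hx | hx
    · simp [hx, pvLaneGet]
    · have hne : (l == x.1) = false := by
        simp only [beq_eq_false_iff_ne]
        intro hEq
        exact hnd.1 (hEq ▸ List.mem_map_of_mem hx)
      have := ih hnd.2 x hx
      rw [pvLaneGet, List.find?_cons_of_neg (by simp [hne])]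
      exact this

-- Python's max(keys, key=f) on a nonempty list is the plain first-max running fold
theorem pvMax?_cons (f : Int → Int) : ∀ (ks : List Int) (b : Int),
    PySem.List.max? (b :: ks) f = some (List.foldl (fun m x => if f m < f x then x else m) b ks) := by
  intro ks
  induction ks with
  | nil => intro b; rfl
  | cons k t ih =>
    intro b
    have step : PySem.List.max? (b :: k :: t) f
        = PySem.List.max? ((if f b < f k then k else b) :: t) f := by
      simp only [PySem.List.max?, List.foldl_cons]
      by_cases h : f b < f k <;> simp [h]
    rw [step, ih, List.foldl_cons]

-- the head of Python's stable reverse sort is the first-max running fold over the list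
theorem pvInsFoldl_head {α : Type} (f : α → Int) : ∀ (xs : List α) (x : α),
    (List.foldl (fun acc z => PySem.List.insertBy (fun a b => decide (f b < f a)) z acc) [] (x :: xs)).head?
      = some (List.foldl (fun m z => if f m < f z then z else m) x xs) := by
  intro xs
  induction xs using List.reverseRecOn with
  | nil => intro x; rfl
  | append_singleton xs y ih =>
    intro x
    rw [show x :: (xs ++ [y]) = (x :: xs) ++ [y] by simp, List.foldl_append, List.foldl_append]
    cases hL : List.foldl (fun acc z => PySem.List.insertBy (fun a b => decide (f b < f a)) z acc) [] (x :: xs) with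
    | nil =>
      have h := ih x
      rw [hL] at h
      simp at h
    | cons m t =>
      have hm : m = List.foldl (fun m z => if f m < f z then z else m) x xs := by
        have h := ih x
        rw [hL] at h
        simpa using h
      rw [← hm]
      simp only [List.foldl_cons, List.foldl_nil, PySem.List.insertBy]
      by_cases h : f m < f y <;> simp [h]

theorem pvSortedRev_head {α : Type} (f : α → Int) (xs : List α) (x : α) :
    (PySem.List.sorted (x :: xs) f true).head?
      = some (List.foldl (fun m z => if f m < f z then z else m) x xs) := by
  rw [PySem.List.sorted_rev_eq_foldl_insertBy]
  exact pvInsFoldl_head f xs x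

-- the first-max fold picks a member of the list
theorem pvFoldMax_mem {α : Type} (f : α → Int) : ∀ (xs : List α) (x : α),
    List.foldl (fun m z => if f m < f z then z else m) x xs ∈ x :: xs := by
  intro xs
  induction xs with
  | nil => intro x; simp
  | cons z t ih =>
    intro x
    rw [List.foldl_cons]
    by_cases h : f x < f z
    · simp only [h, if_pos]
      exact List.mem_cons_of_mem _ (ih z)
    · simp only [h, if_neg, not_false_iff]
      rcases List.mem_cons.mp (ih x) with hx | hx
      · rw [hx]; exact List.mem_cons_self
      · exact List.mem_cons_of_mem _ (List.mem_cons_of_mem _ hx)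

-- the key-level first-max fold (A) is the first component of the item-level one (B)
theorem pvFoldMax_fst (F : Int → Int) (g : Int × List (String × Int) → Int) :
    ∀ (xs : List (Int × List (String × Int))) (x : Int × List (String × Int)),
    (∀ z ∈ x :: xs, F z.1 = g z) →
    List.foldl (fun m z => if F m < F z.1 then z.1 else m) x.1 xs
      = (List.foldl (fun m z => if g m < g z then z else m) x xs).1 := by
  intro xs
  induction xs with
  | nil => intro x _; rfl
  | cons z t ih =>
    intro x hk
    have hx : F x.1 = g x := hk x List.mem_cons_self
    have hz : F z.1 = g z := hk z (List.mem_cons_of_mem _ List.mem_cons_self)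
    simp only [List.foldl_cons, hx, hz]
    by_cases h : g x < g z
    · simp only [h, if_pos]
      exact ih z (fun w hw => by
        rcases List.mem_cons.mp hw with hw | hw
        · exact hw ▸ hz
        · exact hk w (List.mem_cons_of_mem _ (List.mem_cons_of_mem _ hw)))
    · simp only [h, if_neg, not_false_iff]
      exact ih x (fun w hw => by
        rcases List.mem_cons.mp hw with hw | hw
        · exact hw ▸ hx
        · exact hk w (List.mem_cons_of_mem _ (List.mem_cons_of_mem _ hw)))

-- ===== VERDICT (by name: the statement is the Claim_ definition above) =====
theorem decide_lane_spec : Claim_equal_decide_lane := by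
  intro lane_data _ hpre
  obtain ⟨hne, hnd⟩ := hpre
  unfold Spec_decide_lane
  have hf := pvFindEmerg_eq_find? lane_data
  cases hfe : pvFindEmerg lane_data with
  | some lid =>
    rw [hfe] at hf
    obtain ⟨⟨l, d⟩, hfind, hl⟩ := Option.map_eq_some_iff.mp hf.symm
    simp only [ne_eq, decide_not] at hfind
    simp [decide_lane, hfe, decide_lane_alt, hfind, ← hl]
  | none =>
    rw [hfe] at hf
    have hfind : lane_data.find? (fun p => decide (pvGetI p.2 "emergency" ≠ 0)) = none := by
      cases h : lane_data.find? (fun p => decide (pvGetI p.2 "emergency" ≠ 0)) with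
      | none => rfl
      | some p => rw [h] at hf; simp at hf
    obtain ⟨⟨l0, d0⟩, rest, rfl⟩ := List.exists_cons_of_ne_nil hne
    set g : Int × List (String × Int) → Int := fun kv => pvGetI kv.2 "count" with hg
    set F : Int → Int :=
      fun k => pvGetI (pvLaneGet ((l0, d0) :: rest) k) "count" with hF
    have hkey : ∀ x ∈ (l0, d0) :: rest, F x.1 = g x := by
      intro x hx
      rw [hF, hg]; simp only []
      rw [pvLaneGet_self _ hnd x hx]
    set M := List.foldl (fun m z => if g m < g z then z else m) (l0, d0) rest with hM
    have hhead := pvSortedRev_head g rest (l0, d0)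
    obtain ⟨t, hs⟩ : ∃ t, PySem.List.sorted ((l0, d0) :: rest) g true = M :: t := by
      cases hsc : PySem.List.sorted ((l0, d0) :: rest) g true with
      | nil => rw [hsc] at hhead; simp at hhead
      | cons a t =>
        rw [hsc] at hhead
        simp only [List.head?_cons, Option.some.injEq] at hhead
        exact ⟨t, by rw [hhead, ← hM]⟩
    have hmax : PySem.List.max? (((l0, d0) :: rest).map Prod.fst) F = some M.1 := by
      rw [List.map_cons, pvMax?_cons F (rest.map Prod.fst) l0, List.foldl_map]
      rw [pvFoldMax_fst F g rest (l0, d0) hkey]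
    have hMmem : M ∈ (l0, d0) :: rest := pvFoldMax_mem g rest (l0, d0)
    obtain ⟨ml, md⟩ := M
    have hlook : pvGetI (pvLaneGet ((l0, d0) :: rest) ml) "count" = pvGetI md "count" := by
      have := pvLaneGet_self _ hnd (ml, md) hMmem
      simp only [] at this
      rw [this]
    have hfind2 : pvFindEmerg ((l0, d0) :: rest) = none := hfe
    simp only [decide_lane, hfind2]
    rw [← hF, hmax]
    simp only [decide_lane_alt]
    rw [hfind, hs]
    simp [hlook]
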